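-- pv_equiv track=rewrite | github.com/danacitugba/python-project | multi_agent_scheduling/makale1.py | total_node
-- ===== SOURCE A (Python) =====
-- def total_node(number):
--     # number adet işi olan bir problem için toplam node sayısını verir.
--     """
--     :param number: iş sayısı
--     :return toplam_node: düğüm sayısı
--     """
--     toplam_node = 0
--     yeni_node = 1
--     for _ in range(0, number):
--         node = number - _
--         yeni_node = yeni_node * node
--         toplam_node = toplam_node + yeni_node
--     return toplam_node
-- ===== SOURCE B (Python) =====
-- def total_node(number):
--     # Horner-style nested form: n*(1 + (n-1)*(1 + ... + 1*(1+0)...))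
--     acc = 0
--     for i in range(1, number + 1):
--         acc = i * (1 + acc)
--     return acc
-- ===== Notes on version B (the rewrite author's own statement) =====
-- stated objective: alternative
-- what changed: Replaces A's two running accumulators (product of decreasing factors plus running sum) by a single Horner-style nested accumulator acc = i*(1+acc) iterated over increasing i, so no separate running product exists.
import Mathlib
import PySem

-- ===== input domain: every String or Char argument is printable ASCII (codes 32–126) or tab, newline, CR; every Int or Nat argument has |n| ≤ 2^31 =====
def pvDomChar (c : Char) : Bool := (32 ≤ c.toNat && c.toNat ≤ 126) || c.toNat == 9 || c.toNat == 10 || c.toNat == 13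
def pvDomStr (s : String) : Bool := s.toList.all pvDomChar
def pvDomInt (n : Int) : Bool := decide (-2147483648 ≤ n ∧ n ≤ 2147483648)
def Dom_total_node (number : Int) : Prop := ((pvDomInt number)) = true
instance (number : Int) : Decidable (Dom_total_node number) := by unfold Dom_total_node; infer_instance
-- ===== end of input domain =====

-- B replaces A's pair of accumulators (running product of decreasing factors + running sum)
-- by a single Horner-style nested accumulator over increasing factors (objective: alternative).

-- ===== PORT A =====
-- literal port: state (toplam_node, yeni_node), loop over range(0, number)
def total_node (number : Int) : Int :=
  let s := (PySem.List.pyRange 0 number 1).foldl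
    (fun (st : Int × Int) u =>
      let node := number - u
      let yeni := st.2 * node
      (st.1 + yeni, yeni)) (0, 1)
  s.1

-- ===== PORT B =====
-- literal port of Source B: acc = i * (1 + acc) for i in range(1, number+1)
def total_node_alt (number : Int) : Int :=
  (PySem.List.pyRange 1 (number + 1) 1).foldl (fun acc i => i * (1 + acc)) 0

-- ===== PRECONDITION & SPEC =====
def Spec_total_node (number : Int) (out : Int) : Prop := out = total_node_alt number
instance (number : Int) (out : Int) : Decidable (Spec_total_node number out) := by unfold Spec_total_node; infer_instance

-- ===== CLAIM (what is proved, stated in full; the proofs are below) =====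
def Claim_equal_total_node : Prop := ∀ (number : Int), Dom_total_node number → Spec_total_node number (total_node number)

-- ===== LEMMAS AND PROOFS =====

-- running product of A after m steps: num * (num-1) * … * (num-m+1)
def pvP (num : Int) : Nat → Int
  | 0 => 1
  | m + 1 => pvP num m * (num - m)

-- running sum of A after m steps
def pvT (num : Int) : Nat → Int
  | 0 => 0
  | m + 1 => pvT num m + pvP num (m + 1)

-- Horner value computed by B
def pvG : Nat → Int
  | 0 => 0
  | n + 1 => ((n : Int) + 1) * (1 + pvG n)

theorem pvA_fold (num : Int) (m : Nat) :
    ((PySem.List.pyRange 0 (m : Int) 1).foldl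
      (fun (st : Int × Int) u =>
        let node := num - u
        let yeni := st.2 * node
        (st.1 + yeni, yeni)) (0, 1)) = (pvT num m, pvP num m) := by
  induction m with
  | zero => simp [PySem.List.pyRange_one_eq_nil, pvT, pvP]
  | succ m ih =>
      have h : ((m : Int) + 1) = ((m + 1 : Nat) : Int) := by push_cast; ring
      rw [← h, PySem.List.pyRange_one_succ_right (by omega), List.foldl_append, ih]
      simp [pvT, pvP]

theorem pvP_shift (num : Int) (m : Nat) : pvP num (m + 1) = num * pvP (num - 1) m := by
  induction m generalizing num with
  | zero => simp [pvP]
  | succ m ih =>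
      show pvP num (m + 1) * (num - (m + 1 : Nat)) = num * pvP (num - 1) (m + 1)
      rw [ih, show pvP (num - 1) (m + 1) = pvP (num - 1) m * ((num - 1) - m) from rfl]
      push_cast; ring

theorem pvT_shift (num : Int) (m : Nat) : pvT num (m + 1) = num * (1 + pvT (num - 1) m) := by
  induction m generalizing num with
  | zero => simp [pvT, pvP]
  | succ m ih =>
      show pvT num (m + 1) + pvP num (m + 2) = num * (1 + pvT (num - 1) (m + 1))
      rw [ih, pvP_shift num (m + 1),
        show pvT (num - 1) (m + 1) = pvT (num - 1) m + pvP (num - 1) (m + 1) from rfl]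
      ring

theorem pvT_diag (n : Nat) : pvT (n : Int) n = pvG n := by
  induction n with
  | zero => rfl
  | succ n ih =>
      rw [show ((n + 1 : Nat) : Int) = (n : Int) + 1 by push_cast; ring, pvT_shift]
      simp [pvG, ih]

theorem pvB_fold (n : Nat) :
    (PySem.List.pyRange 1 ((n : Int) + 1) 1).foldl (fun acc i => i * (1 + acc)) 0 = pvG n := by
  induction n with
  | zero => simp [PySem.List.pyRange_one_eq_nil, pvG]
  | succ n ih =>
      rw [show ((n + 1 : Nat) : Int) + 1 = ((n : Int) + 1) + 1 by push_cast; ring,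
        PySem.List.pyRange_one_succ_right (by omega), List.foldl_append, ih]
      simp [pvG]

-- ===== VERDICT (by name: the statement is the Claim_ definition above) =====
theorem total_node_spec : Claim_equal_total_node := by
  intro number _
  unfold Spec_total_node total_node total_node_alt
  by_cases h : 0 ≤ number
  · obtain ⟨n, rfl⟩ := Int.eq_ofNat_of_zero_le h
    rw [pvA_fold, pvB_fold]
    exact pvT_diag n
  · rw [PySem.List.pyRange_one_eq_nil (by omega), PySem.List.pyRange_one_eq_nil (by omega)]; rfl
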